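-- pv_equiv track=rewrite | github.com/semykinvr/HelloPython-1 | task36-37.py | get_up_spisok
-- ===== SOURCE A (Python) =====
-- def get_up_spisok(nums):
--     up_spisok = [nums[0]]
--     m = max(up_spisok)
--     for i in nums:
--         if i > m:
--             up_spisok.append(i)
--             m = max(up_spisok)
--     return up_spisok
-- ===== SOURCE B (Python) =====
-- def get_up_spisok(nums):
--     # Two passes: build the running-maximum prefix table, then keep its
--     # strict increase points (plus the first element).
--     acc = []
--     cur = None
--     for x in nums:
--         cur = x if cur is None else (cur if cur > x else x)
--         acc.append(cur)
--     out = [acc[0]]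
--     for prev, a in zip(acc, acc[1:]):
--         if a > prev:
--             out.append(a)
--     return out
-- ===== Notes on version B (the rewrite author's own statement) =====
-- stated objective: faster
-- what changed: Single incremental loop that appends and recomputes max(up_spisok) over the whole grown list each time is replaced by a two-pass decomposition: build the running-maximum prefix table, then select the positions where it strictly increases.
import Mathlib
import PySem

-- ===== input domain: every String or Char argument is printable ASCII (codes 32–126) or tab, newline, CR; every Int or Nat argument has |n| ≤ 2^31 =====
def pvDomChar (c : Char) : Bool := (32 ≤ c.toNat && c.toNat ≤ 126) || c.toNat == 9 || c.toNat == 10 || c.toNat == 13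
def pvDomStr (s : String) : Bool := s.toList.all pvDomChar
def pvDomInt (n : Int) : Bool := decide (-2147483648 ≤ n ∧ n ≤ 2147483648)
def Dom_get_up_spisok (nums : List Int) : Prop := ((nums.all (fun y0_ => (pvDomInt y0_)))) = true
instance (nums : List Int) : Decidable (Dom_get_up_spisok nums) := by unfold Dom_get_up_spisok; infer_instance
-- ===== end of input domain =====

-- B replaces A's single append-and-recompute-max loop by a two-pass decomposition
-- (running-maximum prefix table, then its strict increase points); return values agree
-- on every non-empty list (Python A raises IndexError on []).

-- ===== PORT A =====
-- A's loop state: the growing list up_spisok and m = max(up_spisok).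
def pvStepA (s : List Int × Int) (i : Int) : List Int × Int :=
  if i > s.2 then
    let up := s.1 ++ [i]
    (up, (PySem.List.max? up (fun y => y)).getD 0)
  else s

def get_up_spisok (nums : List Int) : List Int :=
  match PySem.List.pyGet? nums 0 with
  | none => []   -- Python raises IndexError here; excluded by Pre_
  | some h =>
    let up : List Int := [h]
    let m : Int := (PySem.List.max? up (fun y => y)).getD 0
    (nums.foldl pvStepA (up, m)).1

-- ===== PORT B =====
-- first pass of Source B: the running-maximum prefix table
def pvAccum (cur : Int) : List Int → List Int
  | [] => []
  | x :: xs => (if cur > x then cur else x) :: pvAccum (if cur > x then cur else x) xs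

def pvAcc (nums : List Int) : List Int :=
  match nums with
  | [] => []
  | x :: xs => x :: pvAccum x xs

def get_up_spisok_alt (nums : List Int) : List Int :=
  let acc := pvAcc nums
  match PySem.List.pyGet? acc 0 with
  | none => []   -- Python raises IndexError here; excluded by Pre_
  | some a0 =>
    (List.zip acc acc.tail).foldl (fun out p => if p.2 > p.1 then out ++ [p.2] else out) [a0]

-- ===== PRECONDITION & SPEC =====
-- A raises IndexError on the empty list (nums[0]); exactly that is excluded.
def Pre_get_up_spisok (nums : List Int) : Prop := nums ≠ []
instance (nums : List Int) : Decidable (Pre_get_up_spisok nums) := by unfold Pre_get_up_spisok; infer_instance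
def pvWitness_get_up_spisok : List Int := [1, 3, 2, 5]

def Spec_get_up_spisok (nums : List Int) (out : List Int) : Prop := out = get_up_spisok_alt nums
instance (nums : List Int) (out : List Int) : Decidable (Spec_get_up_spisok nums out) := by unfold Spec_get_up_spisok; infer_instance

-- ===== CLAIM (what is proved, stated in full; the proofs are below) =====
def Claim_equal_get_up_spisok : Prop := ∀ (nums : List Int), Dom_get_up_spisok nums → Pre_get_up_spisok nums → Spec_get_up_spisok nums (get_up_spisok nums)

-- ===== LEMMAS AND PROOFS =====

-- common reference form: collect elements strictly above the running max m
def pvG (m : Int) : List Int → List Int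
  | [] => []
  | y :: ys => if y > m then y :: pvG y ys else pvG m ys

theorem pvMax_append_gt (l : List Int) (m i : Int)
    (h : PySem.List.max? l (fun y => y) = some m) (hi : m < i) :
    PySem.List.max? (l ++ [i]) (fun y => y) = some i := by
  rcases l with _ | ⟨x, t⟩
  · simp [PySem.List.max?] at h
  · rw [PySem.List.max?_id_cons] at h
    have h' : t.foldl max x = m := by injection h
    have hc : (x :: t) ++ [i] = x :: (t ++ [i]) := rfl
    rw [hc, PySem.List.max?_id_cons, List.foldl_append]
    simp [h', max_eq_right (le_of_lt hi)]

theorem pvFoldA_eq (ys : List Int) : ∀ (l : List Int) (m : Int),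
    PySem.List.max? l (fun y => y) = some m →
    (ys.foldl pvStepA (l, m)).1 = l ++ pvG m ys := by
  induction ys with
  | nil => intro l m _; simp [pvG]
  | cons y ys ih =>
    intro l m hm
    by_cases hy : y > m
    · have hmax := pvMax_append_gt l m y hm hy
      simp only [List.foldl, pvStepA, hy, pvG, if_true]
      rw [hmax]
      simp only [Option.getD]
      rw [ih (l ++ [y]) y hmax, List.append_assoc]
      rfl
    · simp only [List.foldl, pvStepA, hy, pvG, if_false]
      exact ih l m hm

theorem pvA_eq (x : Int) (xs : List Int) :
    get_up_spisok (x :: xs) = x :: pvG x xs := by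
  unfold get_up_spisok
  simp only [PySem.List.pyGet?, PySem.List.pyIdx?]
  norm_num
  have h1 : PySem.List.max? [x] (fun y => y) = some x := by
    rw [PySem.List.max?_id_cons]; rfl
  have h2 : ((PySem.List.max? [x] fun y => y).getD 0) = x := by rw [h1]; rfl
  rw [h2]
  have step : pvStepA ([x], x) x = ([x], x) := by simp [pvStepA]
  calc (List.foldl pvStepA ([x], x) (x :: xs)).1
      = (List.foldl pvStepA ([x], x) xs).1 := by rw [List.foldl_cons, step]
    _ = [x] ++ pvG x xs := pvFoldA_eq xs [x] x h1
    _ = x :: pvG x xs := rfl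

theorem pvFoldB_eq (ys : List Int) : ∀ (cur : Int) (out : List Int),
    (List.zip (cur :: pvAccum cur ys) (pvAccum cur ys)).foldl
      (fun out p => if p.2 > p.1 then out ++ [p.2] else out) out
    = out ++ pvG cur ys := by
  induction ys with
  | nil => intro cur out; simp [pvAccum, pvG]
  | cons y ys ih =>
    intro cur out
    by_cases hy : y > cur
    · have hmx : (if cur > y then cur else y) = y := by
        rw [if_neg]; omega
      simp only [pvAccum, hmx, List.zip, List.zipWith, List.foldl, pvG]
      rw [if_pos hy, if_pos hy]
      have := ih y (out ++ [y])
      simpa [List.zip, List.append_assoc] using this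
    · have hmx : (if cur > y then cur else y) = cur := by
        by_cases h : cur > y
        · rw [if_pos h]
        · rw [if_neg h]; omega
      simp only [pvAccum, hmx, List.zip, List.zipWith, List.foldl, pvG]
      rw [if_neg (lt_irrefl cur), if_neg (show ¬ cur < y by omega)]
      simpa [List.zip] using ih cur out

theorem pvB_eq (x : Int) (xs : List Int) :
    get_up_spisok_alt (x :: xs) = x :: pvG x xs := by
  unfold get_up_spisok_alt
  simp only [pvAcc, PySem.List.pyGet?, PySem.List.pyIdx?]
  norm_num
  exact pvFoldB_eq xs x [x]

-- ===== VERDICT (by name: the statement is the Claim_ definition above) =====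
theorem get_up_spisok_spec : Claim_equal_get_up_spisok := by
  intro nums _ hpre
  unfold Spec_get_up_spisok
  rcases nums with _ | ⟨x, xs⟩
  · exact absurd rfl hpre
  · rw [pvA_eq, pvB_eq]
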